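-- pv_equiv track=rewrite | github.com/slurrr/apex-risk-trade-tool | tools/curl_runner.py | replace_placeholders
-- ===== SOURCE A (Python) =====
-- def replace_placeholders(text: str) -> str:
--     """
--     Replace {placeholder} patterns with dummy values so docs curls can be pasted directly.
--     Users should still edit if they need real values.
--     """
--     defaults = {
--         "symbol": "BTC-USDT",
--         "side": "BUY",
--         "type": "LIMIT",
--         "size": "0.01",
--         "price": "65000",
--         "limitFee": "100",
--         "expiration": "1767204034000",
--         "timeInForce": "GOOD_TIL_CANCEL",
--         "triggerPrice": "0",
--         "trailingPercent": "0",
--         "clientOrderId": "doc-placeholder",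
--     }
--     out = text
--     for k, v in defaults.items():
--         out = out.replace(f"{{{k}}}", v)
--     # remove any {signature} placeholder
--     out = out.replace("{signature}", "")
--     return out
-- ===== SOURCE B (Python) =====
-- def replace_placeholders(text: str) -> str:
--     """
--     Replace {placeholder} patterns with dummy values so docs curls can be pasted directly.
--     Single left-to-right scan with one lookup table (incl. {signature} -> "") instead of
--     twelve sequential whole-string .replace passes.
--     """
--     mapping = {
--         "symbol": "BTC-USDT",
--         "side": "BUY",
--         "type": "LIMIT",
--         "size": "0.01",
--         "price": "65000",
--         "limitFee": "100",
--         "expiration": "1767204034000",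
--         "timeInForce": "GOOD_TIL_CANCEL",
--         "triggerPrice": "0",
--         "trailingPercent": "0",
--         "clientOrderId": "doc-placeholder",
--         "signature": "",
--     }
--     out = []
--     i = 0
--     n = len(text)
--     while i < n:
--         c = text[i]
--         if c == '{':
--             j = text.find('}', i + 1)
--             if j != -1:
--                 name = text[i + 1:j]
--                 if name in mapping:
--                     out.append(mapping[name])
--                     i = j + 1
--                     continue
--         out.append(c)
--         i += 1
--     return ''.join(out)
-- ===== Notes on version B (the rewrite author's own statement) =====
-- stated objective: alternative
-- what changed: A makes twelve sequential whole-string .replace passes (one per placeholder); B builds a single lookup table (the 11 defaults plus an empty entry for signature) and does one left-to-right scan that, at each opening brace, reads the name up to the next closing brace and substitutes the table entry when the name is known.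
import Mathlib
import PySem

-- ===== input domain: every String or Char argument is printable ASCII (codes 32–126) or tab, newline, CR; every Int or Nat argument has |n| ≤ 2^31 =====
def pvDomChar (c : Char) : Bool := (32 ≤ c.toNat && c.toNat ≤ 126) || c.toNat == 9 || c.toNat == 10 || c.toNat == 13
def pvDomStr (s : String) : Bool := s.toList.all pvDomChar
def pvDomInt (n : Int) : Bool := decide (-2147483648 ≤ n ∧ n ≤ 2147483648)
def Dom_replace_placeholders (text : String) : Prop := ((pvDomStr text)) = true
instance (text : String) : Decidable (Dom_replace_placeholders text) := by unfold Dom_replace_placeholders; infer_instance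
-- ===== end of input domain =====

set_option maxRecDepth 8192

-- B replaces A's twelve sequential whole-string .replace passes by one left-to-right scan with a single lookup table (objective: alternative single-pass algorithm).

-- ===== PORT A =====
-- the dict literal `defaults` as an association list in insertion order
def pvDefaults : List (String × String) :=
  [("symbol", "BTC-USDT"), ("side", "BUY"), ("type", "LIMIT"), ("size", "0.01"),
   ("price", "65000"), ("limitFee", "100"), ("expiration", "1767204034000"),
   ("timeInForce", "GOOD_TIL_CANCEL"), ("triggerPrice", "0"), ("trailingPercent", "0"),
   ("clientOrderId", "doc-placeholder")]

def replace_placeholders (text : String) : String :=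
  -- out = text; for k, v in defaults.items(): out = out.replace(f"{{{k}}}", v)
  let out := pvDefaults.foldl (fun out kv => PySem.Str.replace out ("{" ++ kv.1 ++ "}") kv.2) text
  -- out = out.replace("{signature}", "")
  PySem.Str.replace out "{signature}" ""

-- ===== PORT B =====
-- the dict literal `mapping`
def pvMapping : PySem.Dict String String :=
  PySem.Dict.ofList
    [("symbol", "BTC-USDT"), ("side", "BUY"), ("type", "LIMIT"), ("size", "0.01"),
     ("price", "65000"), ("limitFee", "100"), ("expiration", "1767204034000"),
     ("timeInForce", "GOOD_TIL_CANCEL"), ("triggerPrice", "0"), ("trailingPercent", "0"),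
     ("clientOrderId", "doc-placeholder"), ("signature", "")]

-- `j = text.find('}', i + 1); name = text[i+1:j]` ported on the remaining character list:
-- returns (the characters before the first '}', the characters after it), none if no '}' (j == -1).
def pvParseBrace : List Char → Option (List Char × List Char)
  | [] => none
  | c :: t => if c = '}' then some ([], t) else (pvParseBrace t).map (fun p => (c :: p.1, p.2))

theorem pvParseBrace_len : ∀ (t name rest : List Char),
    pvParseBrace t = some (name, rest) → rest.length ≤ t.length := by
  intro t
  induction t with
  | nil => intro name rest h; simp [pvParseBrace] at h
  | cons c t ih =>
    intro name rest h
    by_cases hc : c = '}'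
    · simp [pvParseBrace, hc] at h
      simp [← h.2]
    · simp [pvParseBrace, hc] at h
      obtain ⟨a, hp, h1, h2⟩ := h
      have := ih a rest hp
      simp only [List.length_cons]
      omega

-- B's while-loop over the string, as recursion over the remaining characters
def pvScan : List Char → List Char
  | [] => []
  | c :: t =>
    if c = '{' then
      match hb : pvParseBrace t with
      | some (name, rest) =>
        match pvMapping.get? (String.ofList name) with
        | some v => v.toList ++ pvScan rest
        | none => c :: pvScan t
      | none => c :: pvScan t
    else c :: pvScan t
termination_by l => l.length
decreasing_by
  all_goals simp
  have := pvParseBrace_len t name rest hb; omega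

def replace_placeholders_alt (text : String) : String :=
  String.ofList (pvScan text.toList)

-- ===== PRECONDITION & SPEC =====
def Spec_replace_placeholders (text : String) (out : String) : Prop := out = replace_placeholders_alt text
instance (text : String) (out : String) : Decidable (Spec_replace_placeholders text out) := by unfold Spec_replace_placeholders; infer_instance

-- ===== CLAIM (what is proved, stated in full; the proofs are below) =====
def Claim_equal_replace_placeholders : Prop := ∀ (text : String), Dom_replace_placeholders text → Spec_replace_placeholders text (replace_placeholders text)

-- ===== LEMMAS AND PROOFS =====

-- a fuel-free form of PySem.Chars.replace for patterns '{' :: ow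
def pvRepC (ow v : List Char) : List Char → List Char
  | [] => []
  | c :: t =>
    if ('{' :: ow).isPrefixOf (c :: t) then v ++ pvRepC ow v (t.drop ow.length)
    else c :: pvRepC ow v t
termination_by l => l.length
decreasing_by
  · simp [Nat.lt_succ_iff]
  · simp

-- char-level mirror of A's fold and its key/value table
def pvFc (ps : List (List Char × List Char)) (x : List Char) : List Char :=
  ps.foldl (fun out kv => pvRepC (kv.1 ++ ['}']) kv.2 out) x

def pvP11 : List (List Char × List Char) := pvDefaults.map (fun kv => (kv.1.toList, kv.2.toList))

def pvSigOw : List Char := "signature".toList ++ ['}']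

def pvAc (l : List Char) : List Char := pvRepC pvSigOw [] (pvFc pvP11 l)

def pvKeys12 : List (List Char) := pvP11.map (·.1) ++ ["signature".toList]

def pvNameOf (u : List Char) : List Char := u.takeWhile (· ≠ '}')

def pvCond (ks : List (List Char)) (u : List Char) : Prop := '}' ∈ u → pvNameOf u ∉ ks

theorem pvRepC_nil (ow v : List Char) : pvRepC ow v [] = [] := by rw [pvRepC]

theorem pvRepC_cons_pos (ow v : List Char) (c : Char) (t : List Char)
    (h : ('{' :: ow) <+: (c :: t)) :
    pvRepC ow v (c :: t) = v ++ pvRepC ow v (t.drop ow.length) := by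
  rw [pvRepC]
  simp only [List.isPrefixOf_iff_prefix.2 h, if_true]

theorem pvRepC_cons_neg (ow v : List Char) (c : Char) (t : List Char)
    (h : ¬ ('{' :: ow) <+: (c :: t)) :
    pvRepC ow v (c :: t) = c :: pvRepC ow v t := by
  rw [pvRepC]
  simp only [if_neg (fun hp => h (List.isPrefixOf_iff_prefix.1 hp))]

theorem pvRepC_cons_ne (ow v : List Char) (c : Char) (t : List Char) (hc : c ≠ '{') :
    pvRepC ow v (c :: t) = c :: pvRepC ow v t := by
  apply pvRepC_cons_neg
  intro hp
  exact hc ((List.cons_prefix_cons.1 hp).1.symm)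

theorem pvRepC_hit (a v rest : List Char) :
    pvRepC (a ++ ['}']) v ('{' :: (a ++ '}' :: rest)) = v ++ pvRepC (a ++ ['}']) v rest := by
  have hpre : ('{' :: (a ++ ['}'])) <+: ('{' :: (a ++ '}' :: rest)) := by
    refine List.cons_prefix_cons.2 ⟨rfl, ?_⟩
    have : a ++ '}' :: rest = (a ++ ['}']) ++ rest := by simp
    rw [this]
    exact List.prefix_append _ _
  rw [pvRepC_cons_pos _ _ _ _ hpre]
  congr 1
  have h1 : a ++ '}' :: rest = (a ++ ['}']) ++ rest := by simp
  rw [h1, List.drop_left]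

theorem pvRepC_append (ow v s u : List Char) (hs : '{' ∉ s) :
    pvRepC ow v (s ++ u) = s ++ pvRepC ow v u := by
  induction s with
  | nil => simp
  | cons c s ih =>
    have hc : c ≠ '{' := fun h => hs (h ▸ List.mem_cons_self ..)
    rw [List.cons_append, pvRepC_cons_ne _ _ _ _ hc, ih (fun h => hs (List.mem_cons_of_mem _ h))]
    simp

theorem pvRepC_id (ow v u : List Char) (how : '}' ∈ ow) (hu : '}' ∉ u) :
    pvRepC ow v u = u := by
  induction u using pvRepC.induct (ow := ow) with
  | case1 => exact pvRepC_nil _ _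
  | case2 c t hp _ =>
    exfalso
    have hsub : ow <+: t := (List.cons_prefix_cons.1 (List.isPrefixOf_iff_prefix.1 hp)).2
    exact hu (List.mem_cons_of_mem _ (hsub.subset how))
  | case3 c t hp ih =>
    rw [pvRepC_cons_neg _ _ _ _ (fun h => hp (List.isPrefixOf_iff_prefix.2 h))]
    rw [ih (fun h => hu (List.mem_cons_of_mem _ h))]

theorem pvBraceMem (ow v u : List Char) (hv : '}' ∉ v) (h : '}' ∈ pvRepC ow v u) : '}' ∈ u := by
  induction u using pvRepC.induct (ow := ow) with
  | case1 => rw [pvRepC_nil] at h; exact absurd h (List.not_mem_nil)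
  | case2 c t hp ih =>
    rw [pvRepC_cons_pos _ _ _ _ (List.isPrefixOf_iff_prefix.1 hp)] at h
    rcases List.mem_append.1 h with h' | h'
    · exact absurd h' hv
    · exact List.mem_cons_of_mem _ (List.mem_of_mem_drop (ih h'))
  | case3 c t hp ih =>
    rw [pvRepC_cons_neg _ _ _ _ (fun h' => hp (List.isPrefixOf_iff_prefix.2 h'))] at h
    rcases List.mem_cons.1 h with h' | h'
    · exact h' ▸ List.mem_cons_self ..
    · exact List.mem_cons_of_mem _ (ih h')

theorem pvNameOf_append (s u : List Char) (hs : '}' ∉ s) :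
    pvNameOf (s ++ u) = s ++ pvNameOf u := by
  induction s with
  | nil => simp
  | cons c s ih =>
    have hc : c ≠ '}' := fun h => hs (h ▸ List.mem_cons_self ..)
    simp only [List.cons_append, pvNameOf, List.takeWhile_cons, decide_eq_true_eq, if_pos hc]
    have := ih (fun h => hs (List.mem_cons_of_mem _ h))
    simpa [pvNameOf] using this

theorem pvName_prefix : ∀ (u : List Char), '}' ∈ u → (pvNameOf u ++ ['}']) <+: u := by
  intro u
  induction u with
  | nil => intro h; exact absurd h (List.not_mem_nil)
  | cons c u ih =>
    intro hmem
    by_cases hc : c = '}'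
    · subst hc; simp [pvNameOf, List.takeWhile]
    · have hn : pvNameOf (c :: u) = c :: pvNameOf u := by
        simp [pvNameOf, List.takeWhile, hc]
      rw [hn, List.cons_append]
      refine List.cons_prefix_cons.2 ⟨rfl, ?_⟩
      refine ih ?_
      rcases List.mem_cons.1 hmem with h | h
      · exact absurd h.symm hc
      · exact h

theorem pvPrefix_iff_name (a u : List Char) (ha : '}' ∉ a) :
    (a ++ ['}']) <+: u ↔ ('}' ∈ u ∧ pvNameOf u = a) := by
  constructor
  · rintro ⟨r, hr⟩
    subst hr
    refine ⟨by simp, ?_⟩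
    have h1 : a ++ ['}'] ++ r = a ++ ('}' :: r) := by simp
    rw [h1, pvNameOf_append _ _ ha]
    simp [pvNameOf, List.takeWhile]
  · rintro ⟨hmem, hname⟩
    rw [← hname]
    exact pvName_prefix u hmem

theorem pvNameOf_brace (u : List Char) : pvNameOf ('}' :: u) = [] := by
  simp [pvNameOf]

theorem pvNameOf_cons_ne (c : Char) (u : List Char) (hc : c ≠ '}') :
    pvNameOf (c :: u) = c :: pvNameOf u := by
  simp [pvNameOf, List.takeWhile_cons, hc]

theorem pvNameEq (ow v : List Char) (hv : v ≠ []) (hvb : '}' ∉ v) :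
    ∀ u, pvNameOf (pvRepC ow v u) = pvNameOf u ∨ v <:+: pvNameOf (pvRepC ow v u) := by
  intro u
  induction u using pvRepC.induct (ow := ow) with
  | case1 => left; rw [pvRepC_nil]
  | case2 c t hp ih =>
    rw [pvRepC_cons_pos _ _ _ _ (List.isPrefixOf_iff_prefix.1 hp)]
    rw [pvNameOf_append _ _ hvb]
    right
    exact ⟨[], pvNameOf (pvRepC ow v (t.drop ow.length)), by simp⟩
  | case3 c t hp ih =>
    rw [pvRepC_cons_neg _ _ _ _ (fun h' => hp (List.isPrefixOf_iff_prefix.2 h'))]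
    by_cases hc : c = '}'
    · subst hc; left; rw [pvNameOf_brace, pvNameOf_brace]
    · rw [pvNameOf_cons_ne _ _ hc, pvNameOf_cons_ne _ _ hc]
      rcases ih with h | h
      · left; rw [h]
      · right
        rcases h with ⟨s', t', hst⟩
        exact ⟨c :: s', t', by rw [← hst]; simp⟩

theorem pvPres (ks : List (List Char)) (ow v u : List Char)
    (hvne : v ≠ []) (hvb : '}' ∉ v)
    (hgood : ∃ c ∈ v, ∀ k ∈ ks, c ∉ k)
    (hne : ∀ k ∈ ks, k ≠ [])
    (h : pvCond ks u) : pvCond ks (pvRepC ow v u) := by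
  intro hmem hk
  rcases pvNameEq ow v hvne hvb u with he | hinf
  · rw [he] at hk
    exact h (pvBraceMem ow v u hvb hmem) hk
  · obtain ⟨c, hcv, hcks⟩ := hgood
    exact hcks _ hk (hinf.subset hcv)

theorem pvFc_append (ps : List (List Char × List Char)) (s u : List Char) (hs : '{' ∉ s) :
    pvFc ps (s ++ u) = s ++ pvFc ps u := by
  induction ps generalizing u with
  | nil => simp [pvFc]
  | cons p ps ih =>
    show pvFc ps (pvRepC (p.1 ++ ['}']) p.2 (s ++ u)) = s ++ pvFc ps (pvRepC (p.1 ++ ['}']) p.2 u)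
    rw [pvRepC_append _ _ _ _ hs]
    exact ih _

theorem pvFc_cons (ps : List (List Char × List Char)) (c : Char) (u : List Char) (hc : c ≠ '{') :
    pvFc ps (c :: u) = c :: pvFc ps u := by
  have := pvFc_append ps [c] u (by simpa using hc.symm)
  simpa using this

theorem pvFc_nil (ps : List (List Char × List Char)) : pvFc ps [] = [] := by
  induction ps with
  | nil => rfl
  | cons p ps ih =>
    show pvFc ps (pvRepC (p.1 ++ ['}']) p.2 []) = []
    rw [pvRepC_nil]; exact ih

theorem pvFc_id (ps : List (List Char × List Char)) (u : List Char) (hu : '}' ∉ u) :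
    pvFc ps u = u := by
  induction ps with
  | nil => rfl
  | cons p ps ih =>
    show pvFc ps (pvRepC (p.1 ++ ['}']) p.2 u) = u
    rw [pvRepC_id _ _ _ (by simp) hu]
    exact ih

theorem pvFc_hit (ps : List (List Char × List Char)) (name v rest : List Char)
    (hname : '}' ∉ name) (hnameb : '{' ∉ name)
    (hps : ∀ p ∈ ps, '{' ∉ p.1 ∧ '}' ∉ p.1 ∧ '{' ∉ p.2)
    (hfind : List.lookup name ps = some v) :
    pvFc ps ('{' :: name ++ '}' :: rest) = v ++ pvFc ps rest := by
  induction ps generalizing rest with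
  | nil => simp [List.lookup] at hfind
  | cons p ps ih =>
    obtain ⟨hp1, hp2, hp3⟩ := hps p (List.mem_cons_self ..)
    by_cases hpe : p.1 = name
    · have hv : v = p.2 := by
        have hb : (name == p.1) = true := beq_iff_eq.2 hpe.symm
        simp only [List.lookup, hb] at hfind
        exact (Option.some_inj.1 hfind).symm
      subst hv
      show pvFc ps (pvRepC (p.1 ++ ['}']) p.2 ('{' :: name ++ '}' :: rest)) = _
      rw [List.cons_append, hpe, pvRepC_hit]
      rw [pvFc_append _ _ _ hp3]
      have hfold : pvFc (p :: ps) rest = pvFc ps (pvRepC (p.1 ++ ['}']) p.2 rest) := rfl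
      rw [hfold, hpe]
    · have hfind' : List.lookup name ps = some v := by
        have hb : (name == p.1) = false := beq_eq_false_iff_ne.2 (fun he => hpe he.symm)
        simp only [List.lookup, hb] at hfind
        exact hfind
      show pvFc ps (pvRepC (p.1 ++ ['}']) p.2 ('{' :: name ++ '}' :: rest)) = _
      have hnp : ¬ ('{' :: (p.1 ++ ['}'])) <+: ('{' :: (name ++ '}' :: rest)) := by
        intro hpre
        have h2 := (List.cons_prefix_cons.1 hpre).2
        have := ((pvPrefix_iff_name p.1 _ hp2).1 h2).2
        rw [pvNameOf_append _ _ hname, pvNameOf_brace, List.append_nil] at this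
        exact hpe this.symm
      rw [List.cons_append, pvRepC_cons_neg _ _ _ _ hnp]
      rw [pvRepC_append _ _ _ _ hnameb, pvRepC_cons_ne _ _ _ _ (by decide)]
      have := ih (fun q hq => hps q (List.mem_cons_of_mem _ hq)) hfind'
        (rest := pvRepC (p.1 ++ ['}']) p.2 rest)
      rw [List.cons_append] at this
      exact this

theorem pvFc_allmiss (ps : List (List Char × List Char)) (name rest : List Char)
    (hname : '}' ∉ name) (hnameb : '{' ∉ name)
    (hps : ∀ p ∈ ps, p.1 ≠ name ∧ '}' ∉ p.1) :
    pvFc ps ('{' :: name ++ '}' :: rest) = '{' :: name ++ '}' :: pvFc ps rest := by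
  induction ps generalizing rest with
  | nil => rfl
  | cons p ps ih =>
    obtain ⟨hp1, hp2⟩ := hps p (List.mem_cons_self ..)
    show pvFc ps (pvRepC (p.1 ++ ['}']) p.2 ('{' :: name ++ '}' :: rest)) = _
    have hnp : ¬ ('{' :: (p.1 ++ ['}'])) <+: ('{' :: (name ++ '}' :: rest)) := by
      intro hpre
      have h2 := (List.cons_prefix_cons.1 hpre).2
      have := ((pvPrefix_iff_name p.1 _ hp2).1 h2).2
      rw [pvNameOf_append _ _ hname, pvNameOf_brace, List.append_nil] at this
      exact hp1 this.symm
    rw [List.cons_append, pvRepC_cons_neg _ _ _ _ hnp]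
    rw [pvRepC_append _ _ _ _ hnameb, pvRepC_cons_ne _ _ _ _ (by decide)]
    have := ih (fun q hq => hps q (List.mem_cons_of_mem _ hq))
      (rest := pvRepC (p.1 ++ ['}']) p.2 rest)
    rw [List.cons_append] at this
    exact this

theorem pvFc_miss (ks : List (List Char)) (ps : List (List Char × List Char))
    (hfst : ∀ p ∈ ps, p.1 ∈ ks ∧ '}' ∉ p.1)
    (hgood : ∀ p ∈ ps, p.2 ≠ [] ∧ '}' ∉ p.2 ∧ ∃ c ∈ p.2, ∀ k ∈ ks, c ∉ k)
    (hne : ∀ k ∈ ks, k ≠ []) :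
    ∀ t, pvCond ks t → pvFc ps ('{' :: t) = '{' :: pvFc ps t ∧ pvCond ks (pvFc ps t) := by
  induction ps with
  | nil => exact fun t h => ⟨rfl, h⟩
  | cons p ps ih =>
    intro t h
    obtain ⟨hp1, hp2⟩ := hfst p (List.mem_cons_self ..)
    obtain ⟨hv1, hv2, hv3⟩ := hgood p (List.mem_cons_self ..)
    have hnp : ¬ ('{' :: (p.1 ++ ['}'])) <+: ('{' :: t) := by
      intro hpre
      have h2 := (List.cons_prefix_cons.1 hpre).2
      obtain ⟨hm, hn⟩ := (pvPrefix_iff_name p.1 _ hp2).1 h2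
      exact h hm (hn ▸ hp1)
    have hcond' : pvCond ks (pvRepC (p.1 ++ ['}']) p.2 t) :=
      pvPres ks _ _ _ hv1 hv2 hv3 hne h
    have := ih (fun q hq => hfst q (List.mem_cons_of_mem _ hq))
      (fun q hq => hgood q (List.mem_cons_of_mem _ hq))
      (pvRepC (p.1 ++ ['}']) p.2 t) hcond'
    refine ⟨?_, this.2⟩
    show pvFc ps (pvRepC (p.1 ++ ['}']) p.2 ('{' :: t)) = _
    rw [pvRepC_cons_neg _ _ _ _ hnp]
    exact this.1

theorem pvParseBrace_sound (t name rest : List Char) (h : pvParseBrace t = some (name, rest)) :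
    t = name ++ '}' :: rest ∧ '}' ∉ name := by
  induction t generalizing name rest with
  | nil => simp [pvParseBrace] at h
  | cons c t ih =>
    by_cases hc : c = '}'
    · subst hc
      rw [pvParseBrace, if_pos rfl] at h
      simp only [Option.some_inj, Prod.mk.injEq] at h
      obtain ⟨h1, h2⟩ := h
      rw [← h1, ← h2]
      exact ⟨rfl, by simp⟩
    · rw [pvParseBrace, if_neg hc] at h
      cases hp : pvParseBrace t with
      | none => rw [hp] at h; simp at h
      | some pr =>
        rw [hp] at h
        simp only [Option.map_some, Option.some_inj, Prod.mk.injEq] at h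
        obtain ⟨h1, h2⟩ := h
        obtain ⟨ht, hn⟩ := ih pr.1 pr.2 (by rw [hp])
        constructor
        · rw [← h1, ← h2, ht]; simp
        · rw [← h1]
          intro hm
          rcases List.mem_cons.1 hm with he | hm'
          · exact hc he.symm
          · exact hn hm'

theorem pvParseBrace_none (t : List Char) (h : pvParseBrace t = none) : '}' ∉ t := by
  induction t with
  | nil => simp
  | cons c t ih =>
    by_cases hc : c = '}'
    · simp [pvParseBrace, hc] at h
    · simp [pvParseBrace, hc] at h
      intro hm
      rcases List.mem_cons.1 hm with he | hm'
      · exact hc he.symm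
      · exact ih h hm'

theorem pvItems : pvMapping.items =
    [("symbol", "BTC-USDT"), ("side", "BUY"), ("type", "LIMIT"), ("size", "0.01"),
     ("price", "65000"), ("limitFee", "100"), ("expiration", "1767204034000"),
     ("timeInForce", "GOOD_TIL_CANCEL"), ("triggerPrice", "0"), ("trailingPercent", "0"),
     ("clientOrderId", "doc-placeholder"), ("signature", "")] := by decide

theorem pvBeqF (s : String) (l : List Char) (hne : l ≠ s.toList) :
    (s == String.ofList l) = false := by
  rw [beq_eq_false_iff_ne]
  intro he
  apply hne
  rw [he]
  simp

theorem pvGet?_eq_none (name : List Char) (h1 : name ∉ pvKeys12) :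
    pvMapping.get? (String.ofList name) = none := by
  have hne : ∀ s : String, s.toList ∈ pvKeys12 → name ≠ s.toList := fun s hs he => h1 (he ▸ hs)
  simp only [PySem.Dict.get?, pvItems, List.find?,
    pvBeqF "symbol" name (hne _ (by decide)), pvBeqF "side" name (hne _ (by decide)),
    pvBeqF "type" name (hne _ (by decide)), pvBeqF "size" name (hne _ (by decide)),
    pvBeqF "price" name (hne _ (by decide)), pvBeqF "limitFee" name (hne _ (by decide)),
    pvBeqF "expiration" name (hne _ (by decide)), pvBeqF "timeInForce" name (hne _ (by decide)),
    pvBeqF "triggerPrice" name (hne _ (by decide)), pvBeqF "trailingPercent" name (hne _ (by decide)),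
    pvBeqF "clientOrderId" name (hne _ (by decide)), pvBeqF "signature" name (hne _ (by decide))]
  rfl

theorem pvGet?_none (name : List Char) (h : pvMapping.get? (String.ofList name) = none) :
    name ∉ pvKeys12 := by
  intro hmem
  simp only [pvKeys12, pvP11, pvDefaults, List.map_cons, List.map_nil, List.mem_append,
    List.mem_cons, List.mem_singleton, List.not_mem_nil, or_false] at hmem
  rcases hmem with (rfl | rfl | rfl | rfl | rfl | rfl | rfl | rfl | rfl | rfl | rfl) | rfl <;>
    (rw [String.ofList_toList] at h; exact absurd h (by decide))

set_option maxHeartbeats 1000000 in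
theorem pvGet?_some (name : List Char) (v : String)
    (h : pvMapping.get? (String.ofList name) = some v) :
    (name = "symbol".toList ∧ v = "BTC-USDT") ∨
    (name = "side".toList ∧ v = "BUY") ∨
    (name = "type".toList ∧ v = "LIMIT") ∨
    (name = "size".toList ∧ v = "0.01") ∨
    (name = "price".toList ∧ v = "65000") ∨
    (name = "limitFee".toList ∧ v = "100") ∨
    (name = "expiration".toList ∧ v = "1767204034000") ∨
    (name = "timeInForce".toList ∧ v = "GOOD_TIL_CANCEL") ∨
    (name = "triggerPrice".toList ∧ v = "0") ∨
    (name = "trailingPercent".toList ∧ v = "0") ∨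
    (name = "clientOrderId".toList ∧ v = "doc-placeholder") ∨
    (name = "signature".toList ∧ v = "") := by
  by_cases h1 : name ∈ pvKeys12
  · simp only [pvKeys12, pvP11, pvDefaults, List.map_cons, List.map_nil, List.mem_append,
      List.mem_cons, List.mem_singleton, List.not_mem_nil, or_false] at h1
    rcases h1 with (rfl | rfl | rfl | rfl | rfl | rfl | rfl | rfl | rfl | rfl | rfl) | rfl
    · rw [String.ofList_toList] at h
      rw [(by decide : pvMapping.get? "symbol" = some "BTC-USDT")] at h
      have hv := Option.some_inj.1 h
      exact Or.inl ⟨rfl, hv.symm⟩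
    · rw [String.ofList_toList] at h
      rw [(by decide : pvMapping.get? "side" = some "BUY")] at h
      have hv := Option.some_inj.1 h
      exact Or.inr (Or.inl ⟨rfl, hv.symm⟩)
    · rw [String.ofList_toList] at h
      rw [(by decide : pvMapping.get? "type" = some "LIMIT")] at h
      have hv := Option.some_inj.1 h
      exact Or.inr (Or.inr (Or.inl ⟨rfl, hv.symm⟩))
    · rw [String.ofList_toList] at h
      rw [(by decide : pvMapping.get? "size" = some "0.01")] at h
      have hv := Option.some_inj.1 h
      exact Or.inr (Or.inr (Or.inr (Or.inl ⟨rfl, hv.symm⟩)))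
    · rw [String.ofList_toList] at h
      rw [(by decide : pvMapping.get? "price" = some "65000")] at h
      have hv := Option.some_inj.1 h
      exact Or.inr (Or.inr (Or.inr (Or.inr (Or.inl ⟨rfl, hv.symm⟩))))
    · rw [String.ofList_toList] at h
      rw [(by decide : pvMapping.get? "limitFee" = some "100")] at h
      have hv := Option.some_inj.1 h
      exact Or.inr (Or.inr (Or.inr (Or.inr (Or.inr (Or.inl ⟨rfl, hv.symm⟩)))))
    · rw [String.ofList_toList] at h
      rw [(by decide : pvMapping.get? "expiration" = some "1767204034000")] at h
      have hv := Option.some_inj.1 h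
      exact Or.inr (Or.inr (Or.inr (Or.inr (Or.inr (Or.inr (Or.inl ⟨rfl, hv.symm⟩))))))
    · rw [String.ofList_toList] at h
      rw [(by decide : pvMapping.get? "timeInForce" = some "GOOD_TIL_CANCEL")] at h
      have hv := Option.some_inj.1 h
      exact Or.inr (Or.inr (Or.inr (Or.inr (Or.inr (Or.inr (Or.inr (Or.inl ⟨rfl, hv.symm⟩)))))))
    · rw [String.ofList_toList] at h
      rw [(by decide : pvMapping.get? "triggerPrice" = some "0")] at h
      have hv := Option.some_inj.1 h
      exact Or.inr (Or.inr (Or.inr (Or.inr (Or.inr (Or.inr (Or.inr (Or.inr (Or.inl ⟨rfl, hv.symm⟩))))))))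
    · rw [String.ofList_toList] at h
      rw [(by decide : pvMapping.get? "trailingPercent" = some "0")] at h
      have hv := Option.some_inj.1 h
      exact Or.inr (Or.inr (Or.inr (Or.inr (Or.inr (Or.inr (Or.inr (Or.inr (Or.inr (Or.inl ⟨rfl, hv.symm⟩)))))))))
    · rw [String.ofList_toList] at h
      rw [(by decide : pvMapping.get? "clientOrderId" = some "doc-placeholder")] at h
      have hv := Option.some_inj.1 h
      exact Or.inr (Or.inr (Or.inr (Or.inr (Or.inr (Or.inr (Or.inr (Or.inr (Or.inr (Or.inr (Or.inl ⟨rfl, hv.symm⟩))))))))))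
    · rw [String.ofList_toList] at h
      rw [(by decide : pvMapping.get? "signature" = some "")] at h
      have hv := Option.some_inj.1 h
      exact Or.inr (Or.inr (Or.inr (Or.inr (Or.inr (Or.inr (Or.inr (Or.inr (Or.inr (Or.inr (Or.inr ⟨rfl, hv.symm⟩))))))))))
  · exact absurd h (by rw [pvGet?_eq_none name h1]; simp)

theorem pvCaseHit (name vL rest : List Char)
    (h1 : '}' ∉ name) (h2 : '{' ∉ name)
    (h3 : List.lookup name pvP11 = some vL) (h4 : '{' ∉ vL) :
    pvAc ('{' :: name ++ '}' :: rest) = vL ++ pvAc rest := by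
  unfold pvAc
  rw [pvFc_hit pvP11 name vL rest h1 h2 (by decide) h3]
  exact pvRepC_append _ _ _ _ h4

theorem pvScan_nil : pvScan [] = [] := by rw [pvScan]

theorem pvScan_cons_ne (c : Char) (t : List Char) (hc : c ≠ '{') :
    pvScan (c :: t) = c :: pvScan t := by
  rw [pvScan]; simp [hc]

theorem pvScan_brace_none (t : List Char) (hp : pvParseBrace t = none) :
    pvScan ('{' :: t) = '{' :: pvScan t := by
  rw [pvScan]
  split
  · split <;> simp_all
  · rfl

theorem pvScan_some_none (t name rest : List Char) (hp : pvParseBrace t = some (name, rest))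
    (hg : pvMapping.get? (String.ofList name) = none) :
    pvScan ('{' :: t) = '{' :: pvScan t := by
  rw [pvScan]
  split
  · split <;> simp_all
  · simp_all

theorem pvScan_some_some (t name rest : List Char) (v : String)
    (hp : pvParseBrace t = some (name, rest))
    (hg : pvMapping.get? (String.ofList name) = some v) :
    pvScan ('{' :: t) = v.toList ++ pvScan rest := by
  rw [pvScan]
  split
  · split <;> simp_all
  · simp_all

theorem pvDB : ∀ p ∈ pvP11, p.1 ∈ pvKeys12 ∧ '}' ∉ p.1 := by decide

theorem pvDC : ∀ p ∈ pvP11, p.2 ≠ [] ∧ '}' ∉ p.2 ∧ ∃ c ∈ p.2, ∀ k ∈ pvKeys12, c ∉ k := by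
  intro p hp
  simp only [pvP11, pvDefaults, List.map_cons, List.map_nil, List.mem_cons, List.not_mem_nil,
    or_false] at hp
  rcases hp with rfl | rfl | rfl | rfl | rfl | rfl | rfl | rfl | rfl | rfl | rfl
  · exact ⟨by decide, by decide, '-', by decide, by decide⟩
  · exact ⟨by decide, by decide, 'Y', by decide, by decide⟩
  · exact ⟨by decide, by decide, 'L', by decide, by decide⟩
  · exact ⟨by decide, by decide, '0', by decide, by decide⟩
  · exact ⟨by decide, by decide, '6', by decide, by decide⟩
  · exact ⟨by decide, by decide, '1', by decide, by decide⟩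
  · exact ⟨by decide, by decide, '1', by decide, by decide⟩
  · exact ⟨by decide, by decide, '_', by decide, by decide⟩
  · exact ⟨by decide, by decide, '0', by decide, by decide⟩
  · exact ⟨by decide, by decide, '0', by decide, by decide⟩
  · exact ⟨by decide, by decide, '-', by decide, by decide⟩

theorem pvDD : ∀ k ∈ pvKeys12, k ≠ [] := by decide

theorem pvSigMem : "signature".toList ∈ pvKeys12 := by decide

theorem pvSigBraceFree : '}' ∉ "signature".toList := by decide

theorem pvDOdd : ∀ p ∈ pvP11, p.1 ≠ "signature".toList ∧ '}' ∉ p.1 := by decide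

theorem pvRepC_hit_sig (rest' : List Char) :
    pvRepC pvSigOw [] ('{' :: ("signature".toList ++ '}' :: rest')) = pvRepC pvSigOw [] rest' := by
  have := pvRepC_hit ("signature".toList) [] rest'
  simpa [pvSigOw] using this

theorem pvMain : ∀ (n : Nat) (l : List Char), l.length ≤ n → pvAc l = pvScan l := by
  intro n
  induction n with
  | zero =>
    intro l hl
    have hnil : l = [] := List.eq_nil_of_length_eq_zero (Nat.le_zero.1 hl)
    subst hnil
    rw [pvScan_nil]
    unfold pvAc
    rw [pvFc_nil, pvRepC_nil]
  | succ n ih =>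
    intro l hl
    cases l with
    | nil =>
      rw [pvScan_nil]
      unfold pvAc
      rw [pvFc_nil, pvRepC_nil]
    | cons c t =>
      have hlt : t.length ≤ n := by simp at hl; omega
      by_cases hc : c = '{'
      · subst hc
        cases hp : pvParseBrace t with
        | none =>
          have hnb : '}' ∉ t := pvParseBrace_none t hp
          have hnb2 : '}' ∉ ('{' :: t) := by
            intro hm
            rcases List.mem_cons.1 hm with he | hm'
            · exact absurd he (by decide)
            · exact hnb hm'
          have hA1 : pvAc ('{' :: t) = '{' :: t := by
            unfold pvAc; rw [pvFc_id _ _ hnb2, pvRepC_id _ _ _ (by decide) hnb2]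
          have hA2 : pvAc t = t := by
            unfold pvAc; rw [pvFc_id _ _ hnb, pvRepC_id _ _ _ (by decide) hnb]
          rw [pvScan_brace_none t hp, hA1]
          rw [(ih t hlt).symm.trans hA2]
        | some pr =>
          obtain ⟨name, rest⟩ := pr
          obtain ⟨ht, hnb⟩ := pvParseBrace_sound t name rest hp
          have hrest : rest.length ≤ n := by
            rw [ht] at hlt; simp at hlt ⊢; omega
          cases hg : pvMapping.get? (String.ofList name) with
          | none =>
            have hks : name ∉ pvKeys12 := pvGet?_none name hg
            have hcond : pvCond pvKeys12 t := by
              intro _ hkk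
              rw [ht, pvNameOf_append _ _ hnb, pvNameOf_brace, List.append_nil] at hkk
              exact hks hkk
            obtain ⟨hstep, hcond'⟩ := pvFc_miss pvKeys12 pvP11 pvDB pvDC pvDD t hcond
            have hnp : ¬ (('{' :: pvSigOw) <+: ('{' :: pvFc pvP11 t)) := by
              intro hpre
              have h2 := (List.cons_prefix_cons.1 hpre).2
              obtain ⟨hm, hn⟩ := (pvPrefix_iff_name ("signature".toList) _ pvSigBraceFree).1 h2
              exact hcond' hm (hn ▸ pvSigMem)
            rw [pvScan_some_none t name rest hp hg]
            unfold pvAc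
            rw [hstep, pvRepC_cons_neg _ _ _ _ hnp]
            have hihr := ih t hlt
            unfold pvAc at hihr
            rw [hihr]
          | some v =>
            rcases pvGet?_some name v hg with ⟨rfl, rfl⟩ | ⟨rfl, rfl⟩ | ⟨rfl, rfl⟩ | ⟨rfl, rfl⟩ |
              ⟨rfl, rfl⟩ | ⟨rfl, rfl⟩ | ⟨rfl, rfl⟩ | ⟨rfl, rfl⟩ | ⟨rfl, rfl⟩ | ⟨rfl, rfl⟩ |
              ⟨rfl, rfl⟩ | ⟨rfl, rfl⟩
            · rw [pvScan_some_some t _ rest _ hp hg, ht, ← List.cons_append]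
              rw [pvCaseHit ("symbol".toList) ("BTC-USDT".toList) rest (by decide) (by decide)
                (by decide) (by decide), ih rest hrest]
            · rw [pvScan_some_some t _ rest _ hp hg, ht, ← List.cons_append]
              rw [pvCaseHit ("side".toList) ("BUY".toList) rest (by decide) (by decide)
                (by decide) (by decide), ih rest hrest]
            · rw [pvScan_some_some t _ rest _ hp hg, ht, ← List.cons_append]
              rw [pvCaseHit ("type".toList) ("LIMIT".toList) rest (by decide) (by decide)
                (by decide) (by decide), ih rest hrest]
            · rw [pvScan_some_some t _ rest _ hp hg, ht, ← List.cons_append]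
              rw [pvCaseHit ("size".toList) ("0.01".toList) rest (by decide) (by decide)
                (by decide) (by decide), ih rest hrest]
            · rw [pvScan_some_some t _ rest _ hp hg, ht, ← List.cons_append]
              rw [pvCaseHit ("price".toList) ("65000".toList) rest (by decide) (by decide)
                (by decide) (by decide), ih rest hrest]
            · rw [pvScan_some_some t _ rest _ hp hg, ht, ← List.cons_append]
              rw [pvCaseHit ("limitFee".toList) ("100".toList) rest (by decide) (by decide)
                (by decide) (by decide), ih rest hrest]
            · rw [pvScan_some_some t _ rest _ hp hg, ht, ← List.cons_append]
              rw [pvCaseHit ("expiration".toList) ("1767204034000".toList) rest (by decide) (by decide)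
                (by decide) (by decide), ih rest hrest]
            · rw [pvScan_some_some t _ rest _ hp hg, ht, ← List.cons_append]
              rw [pvCaseHit ("timeInForce".toList) ("GOOD_TIL_CANCEL".toList) rest (by decide) (by decide)
                (by decide) (by decide), ih rest hrest]
            · rw [pvScan_some_some t _ rest _ hp hg, ht, ← List.cons_append]
              rw [pvCaseHit ("triggerPrice".toList) ("0".toList) rest (by decide) (by decide)
                (by decide) (by decide), ih rest hrest]
            · rw [pvScan_some_some t _ rest _ hp hg, ht, ← List.cons_append]
              rw [pvCaseHit ("trailingPercent".toList) ("0".toList) rest (by decide) (by decide)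
                (by decide) (by decide), ih rest hrest]
            · rw [pvScan_some_some t _ rest _ hp hg, ht, ← List.cons_append]
              rw [pvCaseHit ("clientOrderId".toList) ("doc-placeholder".toList) rest (by decide) (by decide)
                (by decide) (by decide), ih rest hrest]
            · rw [pvScan_some_some t _ rest _ hp hg, ht]
              unfold pvAc
              rw [← List.cons_append, pvFc_allmiss pvP11 _ rest (by decide) (by decide) pvDOdd,
                List.cons_append, pvRepC_hit_sig]
              have hihr := ih rest hrest
              unfold pvAc at hihr
              rw [hihr]
              rfl
      · rw [pvScan_cons_ne c t hc]
        unfold pvAc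
        rw [pvFc_cons _ _ _ hc, pvRepC_cons_ne _ _ _ _ hc]
        have hihr := ih t hlt
        unfold pvAc at hihr
        rw [hihr]

theorem pvGoLemma (ow v : List Char) :
    ∀ (fuel : Nat) (l acc : List Char), l.length ≤ fuel →
      PySem.Chars.replace.go ('{' :: ow) v fuel l acc = acc.reverse ++ pvRepC ow v l := by
  intro fuel
  induction fuel with
  | zero =>
    intro l acc hl
    have hnil : l = [] := List.eq_nil_of_length_eq_zero (Nat.le_zero.1 hl)
    subst hnil
    rw [PySem.Chars.replace.go, pvRepC_nil]
  | succ fuel ih =>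
    intro l acc hl
    cases l with
    | nil =>
      rw [PySem.Chars.replace.go]
      all_goals first
        | omega
        | simp [pvRepC_nil]
    | cons c t =>
      rw [PySem.Chars.replace.go]
      by_cases hp : ('{' :: ow).isPrefixOf (c :: t)
      · rw [if_pos hp]
        have hl' : (List.drop ('{' :: ow).length (c :: t)).length ≤ fuel := by
          simp at hl ⊢; omega
        rw [ih _ _ hl']
        rw [pvRepC_cons_pos _ _ _ _ (List.isPrefixOf_iff_prefix.1 hp)]
        simp [List.drop_succ_cons]
      · rw [if_neg hp]
        have hl' : t.length ≤ fuel := by simp at hl; omega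
        rw [ih _ _ hl']
        rw [pvRepC_cons_neg _ _ _ _ (fun hpre => hp (List.isPrefixOf_iff_prefix.2 hpre))]
        simp

theorem pvReplace_eq_repC (ow v s : List Char) :
    PySem.Chars.replace s ('{' :: ow) v = pvRepC ow v s := by
  have h := pvGoLemma ow v s.length s [] le_rfl
  simp only [List.reverse_nil, List.nil_append] at h
  simp [PySem.Chars.replace, h]

theorem pvFoldRep (ps : List (String × String)) (s : String) :
    (ps.foldl (fun out kv => PySem.Str.replace out ("{" ++ kv.1 ++ "}") kv.2) s).toList =
      pvFc (ps.map (fun kv => (kv.1.toList, kv.2.toList))) s.toList := by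
  induction ps generalizing s with
  | nil => simp [pvFc]
  | cons kv ps ih =>
    show (ps.foldl _ (PySem.Str.replace s ("{" ++ kv.1 ++ "}") kv.2)).toList = _
    rw [ih]
    have ht : (PySem.Str.replace s ("{" ++ kv.1 ++ "}") kv.2).toList
        = pvRepC (kv.1.toList ++ ['}']) kv.2.toList s.toList := by
      rw [PySem.Str.toList_replace]
      have hpat : ("{" ++ kv.1 ++ "}").toList = '{' :: (kv.1.toList ++ ['}']) := by
        simp [String.toList_append]
      rw [hpat, pvReplace_eq_repC]
    rw [ht]
    rfl

theorem pvBridgeA (text : String) :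
    replace_placeholders text = String.ofList (pvAc text.toList) := by
  have h0 : replace_placeholders text = PySem.Str.replace
      (pvDefaults.foldl (fun out kv => PySem.Str.replace out ("{" ++ kv.1 ++ "}") kv.2) text)
      "{signature}" "" := rfl
  have h1 : (replace_placeholders text).toList = pvAc text.toList := by
    rw [h0, PySem.Str.toList_replace, pvFoldRep]
    have hpat : ("{signature}" : String).toList = '{' :: pvSigOw := by decide
    have hemp : ("" : String).toList = [] := rfl
    rw [hpat, hemp, pvReplace_eq_repC]
    rfl
  calc replace_placeholders text
      = String.ofList (replace_placeholders text).toList := String.ofList_toList.symm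
    _ = String.ofList (pvAc text.toList) := by rw [h1]

-- ===== VERDICT (by name: the statement is the Claim_ definition above) =====
theorem replace_placeholders_spec : Claim_equal_replace_placeholders := by
  intro text _
  unfold Spec_replace_placeholders replace_placeholders_alt
  rw [pvBridgeA]
  exact congrArg String.ofList (pvMain text.toList.length text.toList le_rfl)
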